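-- pv_equiv track=rewrite | github.com/caseufrj/controle-de-notas | telas/notas.py | _texto_para_digitacao
-- ===== SOURCE A (Python) =====
-- def _texto_para_digitacao(s: str) -> str:
--     """
--     Modo digitação (sem prefixo, sem milhar). Mantém só dígitos e 1 vírgula.
--     Converte ponto para vírgula e permite no máx. 2 casas decimais.
--     """
--     s = (s or "").strip()
--     s = s.replace("R$", "").replace(" ", "")
--     s = s.replace(".", ",")
--     # mantém apenas dígitos e vírgulas
--     s = "".join(ch for ch in s if (ch.isdigit() or ch == ","))
--     # deixa apenas uma vírgula (a primeira)
--     if s.count(",") > 1: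
--         partes = s.split(",")
--         s = partes[0] + "," + "".join(partes[1:]).replace(",", "")
--     # limita 2 decimais
--     if "," in s:
--         inteira, dec = s.split(",", 1)
--         dec = dec[:2]
--         s = inteira + "," + dec
--     return s
-- ===== SOURCE B (Python) =====
-- def _texto_para_digitacao(s: str) -> str:
--     # Single left-to-right scan: keep digits, first '.'/',' becomes the one comma,
--     # count at most 2 digits after it; every other character is ignored.
--     out = []
--     seen_comma = False
--     decimals = 0
--     for ch in (s or ""):
--         if ch.isdigit():
--             if not seen_comma:
--                 out.append(ch)
--             elif decimals < 2:
--                 out.append(ch)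
--                 decimals += 1
--         elif ch in ".,":
--             if not seen_comma:
--                 out.append(",")
--                 seen_comma = True
--     return "".join(out)
-- ===== Notes on version B (the rewrite author's own statement) =====
-- stated objective: simpler
-- what changed: Replaces A's multi-pass strip/replace/filter/split/join pipeline with a single left-to-right scan keeping a seen_comma flag and a decimals counter.
import Mathlib
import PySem

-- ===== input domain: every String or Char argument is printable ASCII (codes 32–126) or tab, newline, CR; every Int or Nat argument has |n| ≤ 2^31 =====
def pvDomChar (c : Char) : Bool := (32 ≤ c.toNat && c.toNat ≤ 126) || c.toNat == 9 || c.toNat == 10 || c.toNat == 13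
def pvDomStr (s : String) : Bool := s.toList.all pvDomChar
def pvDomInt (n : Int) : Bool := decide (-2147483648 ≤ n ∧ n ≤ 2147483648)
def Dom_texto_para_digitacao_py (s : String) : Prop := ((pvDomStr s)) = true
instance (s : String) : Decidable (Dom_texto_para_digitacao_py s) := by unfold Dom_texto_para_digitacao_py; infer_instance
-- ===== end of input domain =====

-- B replaces A's multi-pass strip/replace/filter/split/join pipeline by one stateful
-- left-to-right scan (seen_comma flag + decimals counter); objective: simpler, one pass.

-- ===== PORT A =====
-- A's filter predicate: ch.isdigit() or ch == ','
def pvP (c : Char) : Bool := PySem.Chars.isdigit c || c == ','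

-- literal transliteration of A on the character list (PySem.Str.* are thin wrappers
-- over these PySem.Chars.* functions); '(s or "").strip()' = strip, since "" is falsy
def pvAcore (cs : List Char) : List Char :=
  let s1 := PySem.Chars.strip cs
  let s2 := PySem.Chars.replace (PySem.Chars.replace s1 ['R', '$'] []) [' '] []
  let s3 := PySem.Chars.replace s2 ['.'] [',']
  -- "".join(ch for ch in s if ch.isdigit() or ch == ",")
  let s4 := s3.filter pvP
  -- if s.count(",") > 1: s = partes[0] + "," + "".join(partes[1:]).replace(",", "")
  let s5 := if 1 < PySem.Chars.count s4 [','] then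
      let partes := PySem.Chars.splitOn s4 [',']
      partes.headD [] ++ [','] ++ PySem.Chars.replace (PySem.Chars.join [] partes.tail) [','] []
    else s4
  -- if "," in s: inteira, dec = s.split(",", 1); s = inteira + "," + dec[:2]
  if PySem.Chars.isIn [','] s5 then
    match PySem.Chars.splitOnMax s5 [','] 1 with
    | inteira :: dec :: _ => inteira ++ [','] ++ PySem.List.slice dec none (some 2)
    | _ => s5  -- unreachable: s.split(",", 1) has two pieces whenever "," in s
  else s5

def texto_para_digitacao_py (s : String) : String := String.mk (pvAcore s.toList)

-- ===== PORT B =====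
-- one fold step of Source B's scan; state = (seen_comma, decimals, out)
def pvBstep (st : Bool × Nat × List Char) (ch : Char) : Bool × Nat × List Char :=
  if PySem.Chars.isdigit ch then
    if !st.1 then (st.1, st.2.1, st.2.2 ++ [ch])
    else if st.2.1 < 2 then (st.1, st.2.1 + 1, st.2.2 ++ [ch])
    else st
  else if ch == '.' || ch == ',' then
    if !st.1 then (true, st.2.1, st.2.2 ++ [','])
    else st
  else st

def texto_para_digitacao_py_alt (s : String) : String :=
  String.mk ((s.toList.foldl pvBstep (false, 0, [])).2.2)

-- ===== PRECONDITION & SPEC =====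
def Spec_texto_para_digitacao_py (s : String) (out : String) : Prop := out = texto_para_digitacao_py_alt s
instance (s : String) (out : String) : Decidable (Spec_texto_para_digitacao_py s out) := by unfold Spec_texto_para_digitacao_py; infer_instance

-- ===== CLAIM (what is proved, stated in full; the proofs are below) =====
def Claim_equal_texto_para_digitacao_py : Prop := ∀ (s : String), Dom_texto_para_digitacao_py s → Spec_texto_para_digitacao_py s (texto_para_digitacao_py s)

-- ===== LEMMAS AND PROOFS =====

-- the '.' → ',' character map
def pvF (c : Char) : Char := if c = '.' then ',' else c
-- predicate "survives A's filter after the '.' → ',' map"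
def pvQ (c : Char) : Bool := pvP (pvF c)
-- canonical result on an already-filtered list (digits and commas only):
-- integer part, one comma, first two characters after the first comma that are not commas
def pvR (l : List Char) : List Char :=
  if ',' ∈ l then
    l.takeWhile (· != ',') ++ ',' :: (((l.dropWhile (· != ',')).tail).filter (· != ',')).take 2
  else l

theorem pvR_cons (c : Char) (t : List Char) (hc : c ≠ ',') : pvR (c :: t) = c :: pvR t := by
  have hb : (c != ',') = true := by simp [hc]
  by_cases hm : ',' ∈ t
  · simp [pvR, hm, hc, hb]
  · have h1 : ',' ∉ c :: t := by simp [hm]; exact fun h => hc h.symm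
    rw [pvR, if_neg h1, pvR, if_neg hm]

-- ---- equation lemmas for the fueled PySem helpers ----
theorem pvRgo_zero (old new l acc : List Char) :
    PySem.Chars.replace.go old new 0 l acc = acc.reverse ++ l := by
  rw [PySem.Chars.replace.go]
theorem pvRgo_nil (old new : List Char) (n : Nat) (acc : List Char) :
    PySem.Chars.replace.go old new (n+1) [] acc = acc.reverse := by
  rw [PySem.Chars.replace.go]; omega
theorem pvRgo_cons (old new : List Char) (n : Nat) (c : Char) (t acc : List Char) :
    PySem.Chars.replace.go old new (n+1) (c::t) acc =
      if old.isPrefixOf (c::t) then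
        PySem.Chars.replace.go old new n (List.drop old.length (c::t)) (new.reverse ++ acc)
      else PySem.Chars.replace.go old new n t (c::acc) := by
  rw [PySem.Chars.replace.go]
theorem pvCgo_zero (sub l : List Char) (acc : Nat) : PySem.Chars.count.go sub 0 l acc = acc := by
  rw [PySem.Chars.count.go]
theorem pvCgo_nil (sub : List Char) (n acc : Nat) : PySem.Chars.count.go sub (n+1) [] acc = acc := by
  rw [PySem.Chars.count.go]; omega
theorem pvCgo_cons (sub : List Char) (n : Nat) (c : Char) (t : List Char) (acc : Nat) :
    PySem.Chars.count.go sub (n+1) (c::t) acc =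
      if sub.isPrefixOf (c::t) then PySem.Chars.count.go sub n (List.drop sub.length (c::t)) (acc+1)
      else PySem.Chars.count.go sub n t acc := by
  rw [PySem.Chars.count.go]
theorem pvSgo_zero (sep l cur : List Char) (acc : List (List Char)) :
    PySem.Chars.splitOn.go sep 0 l cur acc = acc.reverse ++ [cur.reverse ++ l] := by
  rw [PySem.Chars.splitOn.go]; simp
theorem pvSgo_nil (sep : List Char) (n : Nat) (cur : List Char) (acc : List (List Char)) :
    PySem.Chars.splitOn.go sep (n+1) [] cur acc = acc.reverse ++ [cur.reverse] := by
  rw [PySem.Chars.splitOn.go]; simp; omega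
theorem pvSgo_cons (sep : List Char) (n : Nat) (c : Char) (t cur : List Char) (acc : List (List Char)) :
    PySem.Chars.splitOn.go sep (n+1) (c::t) cur acc =
      if sep.isPrefixOf (c::t) then
        PySem.Chars.splitOn.go sep n (List.drop sep.length (c::t)) [] (cur.reverse :: acc)
      else PySem.Chars.splitOn.go sep n t (c::cur) acc := by
  rw [PySem.Chars.splitOn.go]
theorem pvMgo_zero (sep : List Char) (m : Nat) (l cur : List Char) (acc : List (List Char)) :
    PySem.Chars.splitOnMax.go sep 0 m l cur acc = acc.reverse ++ [cur.reverse ++ l] := by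
  rw [PySem.Chars.splitOnMax.go]; simp
theorem pvMgo_nil (sep : List Char) (n m : Nat) (cur : List Char) (acc : List (List Char)) :
    PySem.Chars.splitOnMax.go sep (n+1) m [] cur acc = acc.reverse ++ [cur.reverse] := by
  rw [PySem.Chars.splitOnMax.go]; simp; omega
theorem pvMgo_cons (sep : List Char) (n m : Nat) (c : Char) (t cur : List Char) (acc : List (List Char)) :
    PySem.Chars.splitOnMax.go sep (n+1) m (c::t) cur acc =
      if m = 0 then acc.reverse ++ [cur.reverse ++ (c::t)]
      else if sep.isPrefixOf (c::t) then
        PySem.Chars.splitOnMax.go sep n (m-1) (List.drop sep.length (c::t)) [] (cur.reverse :: acc)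
      else PySem.Chars.splitOnMax.go sep n m t (c::cur) acc := by
  rw [PySem.Chars.splitOnMax.go]; split <;> simp

theorem pvPrefix_singleton (v c : Char) (t : List Char) :
    ([v].isPrefixOf (c::t)) = (v == c) := by
  simp [List.isPrefixOf]

-- replace(old=[v], new=[]) deletes every occurrence of v
theorem pvGo_del (v : Char) (fuel : Nat) (l acc : List Char) (h : l.length ≤ fuel) :
    PySem.Chars.replace.go [v] [] fuel l acc = acc.reverse ++ l.filter (· != v) := by
  induction fuel generalizing l acc with
  | zero => rw [pvRgo_zero]; simp at h; simp [h]
  | succ n ih =>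
    cases l with
    | nil => rw [pvRgo_nil]; simp
    | cons c t =>
      rw [pvRgo_cons, pvPrefix_singleton]
      simp at h
      by_cases hc : v = c
      · subst hc
        rw [if_pos (by simp)]
        simp only [List.length_cons, List.length_nil, List.drop_succ_cons, List.drop_zero,
          List.reverse_nil, List.nil_append]
        rw [ih _ _ h]
        simp
      · have : (v == c) = false := by simp [hc]
        simp only [this, Bool.false_eq_true, if_false]
        rw [ih _ _ h]
        have : (c != v) = true := by simp [Ne.symm hc]
        simp [this]

-- replace(old=[o], new=[nc]) maps o to nc characterwise
theorem pvGo_map (o nc : Char) (fuel : Nat) (l acc : List Char) (h : l.length ≤ fuel) :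
    PySem.Chars.replace.go [o] [nc] fuel l acc
      = acc.reverse ++ l.map (fun c => if c = o then nc else c) := by
  induction fuel generalizing l acc with
  | zero => rw [pvRgo_zero]; simp at h; simp [h]
  | succ n ih =>
    cases l with
    | nil => rw [pvRgo_nil]; simp
    | cons c t =>
      rw [pvRgo_cons, pvPrefix_singleton]
      simp at h
      by_cases hc : o = c
      · subst hc
        rw [if_pos (by simp)]
        simp only [List.length_cons, List.length_nil, List.drop_succ_cons, List.drop_zero]
        rw [ih _ _ h]
        simp
      · have h1 : (o == c) = false := by simp [hc]
        simp only [h1, Bool.false_eq_true, if_false]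
        rw [ih _ _ h]
        simp [Ne.symm hc]

-- filtering with p commutes over deleting a pattern whose characters all fail p
theorem pvGo_del_filter (p : Char → Bool) (old : List Char) (hold : old ≠ [])
    (hp : ∀ c ∈ old, p c = false) (fuel : Nat) (l acc : List Char) (h : l.length ≤ fuel) :
    (PySem.Chars.replace.go old [] fuel l acc).filter p
      = acc.reverse.filter p ++ l.filter p := by
  induction fuel generalizing l acc with
  | zero => rw [pvRgo_zero]; simp at h; simp [h]
  | succ n ih =>
    cases l with
    | nil => rw [pvRgo_nil]; simp
    | cons c t =>
      rw [pvRgo_cons]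
      split
      · next hpre =>
        have hpref : old <+: (c::t) := by
          rwa [← List.isPrefixOf_iff_prefix]
        obtain ⟨r, hr⟩ := hpref
        have hdrop : List.drop old.length (c::t) = r := by
          rw [← hr]; simp
        have hlen : r.length ≤ n := by
          have := congrArg List.length hr
          simp at this h
          cases old with
          | nil => exact absurd rfl hold
          | cons o ot => simp at this; omega
        rw [hdrop, ih _ _ hlen]
        have hfo : old.filter p = [] := List.filter_eq_nil_iff.mpr (fun c hc => by simp [hp c hc])
        rw [← hr]
        simp [List.filter_append, hfo]
      · next hpre =>
        simp at h
        rw [ih _ _ h]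
        by_cases hpc : p c = true
        · simp [List.filter_append, List.filter_cons, hpc]
        · simp [List.filter_append, List.filter_cons, hpc]

theorem pvCount_go (v : Char) (fuel : Nat) (l : List Char) (acc : Nat) (h : l.length ≤ fuel) :
    PySem.Chars.count.go [v] fuel l acc = acc + l.count v := by
  induction fuel generalizing l acc with
  | zero => simp at h; simp [h, pvCgo_zero]
  | succ n ih =>
    cases l with
    | nil => rw [pvCgo_nil]; simp
    | cons c t =>
      rw [pvCgo_cons, pvPrefix_singleton]
      simp at h
      by_cases hc : v = c
      · subst hc
        rw [if_pos (by simp)]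
        simp only [List.length_cons, List.length_nil, List.drop_succ_cons, List.drop_zero]
        rw [ih _ _ h]
        simp [List.count_cons]
        omega
      · have h1 : (v == c) = false := by simp [hc]
        simp only [h1, Bool.false_eq_true, if_false]
        rw [ih _ _ h]
        simp [List.count_cons, Ne.symm hc]

-- reference splitter: pieces of l between occurrences of v, first piece prefixed by pre
def pvPieces (v : Char) (pre l : List Char) : List (List Char) :=
  match l with
  | [] => [pre]
  | c :: t => if c = v then pre :: pvPieces v [] t else pvPieces v (pre ++ [c]) t

theorem pvSplitOn_go (v : Char) (fuel : Nat) (l cur : List Char) (acc : List (List Char))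
    (h : l.length ≤ fuel) :
    PySem.Chars.splitOn.go [v] fuel l cur acc = acc.reverse ++ pvPieces v cur.reverse l := by
  induction fuel generalizing l cur acc with
  | zero => simp at h; simp [h, pvSgo_zero, pvPieces]
  | succ n ih =>
    cases l with
    | nil => rw [pvSgo_nil]; simp [pvPieces]
    | cons c t =>
      rw [pvSgo_cons, pvPrefix_singleton]
      simp at h
      by_cases hc : v = c
      · subst hc
        rw [if_pos (by simp)]
        simp only [List.length_cons, List.length_nil, List.drop_succ_cons, List.drop_zero]
        rw [ih _ _ _ h]
        simp [pvPieces]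
      · have h1 : (v == c) = false := by simp [hc]
        simp only [h1, Bool.false_eq_true, if_false]
        rw [ih _ _ _ h]
        simp [pvPieces, Ne.symm hc]

theorem pvPieces_mem (v : Char) (pre l : List Char) (h : v ∈ l) :
    pvPieces v pre l
      = (pre ++ l.takeWhile (· != v)) :: pvPieces v [] ((l.dropWhile (· != v)).tail) := by
  induction l generalizing pre with
  | nil => simp at h
  | cons c t ih =>
    by_cases hc : c = v
    · simp [pvPieces, hc]
    · have hm : v ∈ t := by simpa [Ne.symm hc] using h
      have hb : (c != v) = true := by simp [hc]
      simp only [pvPieces, if_neg hc, List.takeWhile_cons, hb, if_pos, List.dropWhile_cons_of_pos]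
      rw [ih _ hm]
      simp

theorem pvPieces_flatten (v : Char) (pre l : List Char) :
    (pvPieces v pre l).flatten = pre ++ l.filter (· != v) := by
  induction l generalizing pre with
  | nil => simp [pvPieces]
  | cons c t ih =>
    by_cases hc : c = v
    · simp [pvPieces, hc, ih]
    · have hb : (c != v) = true := by simp [hc]
      simp [pvPieces, hc, ih, hb]

theorem pvIntercalate_nil (xs : List (List Char)) : List.intercalate [] xs = xs.flatten := by
  induction xs with
  | nil => rfl
  | cons x t ih =>
    cases t with
    | nil => simp [List.intercalate]
    | cons y u =>
      simp only [List.intercalate, List.intersperse_cons₂] at ih ⊢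
      simp_all [List.intercalate]

theorem pvSplitMax_go0 (v : Char) (fuel : Nat) (l cur : List Char) (acc : List (List Char)) :
    PySem.Chars.splitOnMax.go [v] fuel 0 l cur acc = acc.reverse ++ [cur.reverse ++ l] := by
  cases fuel with
  | zero => exact pvMgo_zero _ _ _ _ _
  | succ n =>
    cases l with
    | nil => rw [pvMgo_nil]; simp
    | cons c t => rw [pvMgo_cons]; simp

theorem pvSplitMax_go1 (v : Char) (fuel : Nat) (l cur : List Char) (acc : List (List Char))
    (h : l.length ≤ fuel) :
    PySem.Chars.splitOnMax.go [v] fuel 1 l cur acc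
      = acc.reverse ++ (if v ∈ l then
          [cur.reverse ++ l.takeWhile (· != v), (l.dropWhile (· != v)).tail]
        else [cur.reverse ++ l]) := by
  induction fuel generalizing l cur acc with
  | zero => simp at h; simp [h, pvMgo_zero]
  | succ n ih =>
    cases l with
    | nil => rw [pvMgo_nil]; simp
    | cons c t =>
      rw [pvMgo_cons, pvPrefix_singleton]
      simp at h
      by_cases hc : v = c
      · subst hc
        rw [if_neg (by omega : ¬ (1:Nat) = 0), if_pos (by simp)]
        simp only [List.length_cons, List.length_nil, List.drop_succ_cons, List.drop_zero]
        rw [pvSplitMax_go0]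
        have hvv : (v != v) = false := by simp
        simp [List.mem_cons, hvv]
      · have h1 : (v == c) = false := by simp [hc]
        have hb : (c != v) = true := by simp [Ne.symm hc]
        simp only [h1, Bool.false_eq_true, if_false, if_neg (by omega : ¬ (1:Nat) = 0)]
        rw [ih _ _ _ h]
        by_cases hm : v ∈ t
        · simp [hm, hb, hc]
        · simp [hm, hb, hc]

theorem pvIsIn_singleton (v : Char) (l : List Char) : PySem.Chars.isIn [v] l = true ↔ v ∈ l := by
  rw [PySem.Chars.isIn_iff_infix]
  constructor
  · exact fun h => h.sublist.subset (List.mem_singleton_self v)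
  · intro h
    obtain ⟨s, t, rfl⟩ := List.append_of_mem h
    exact ⟨s, t, by simp⟩

-- takeWhile / dropWhile across "good prefix ++ failing head ++ rest"
theorem pvTW (p : Char → Bool) (a : List Char) (y : Char) (x : List Char)
    (ha : ∀ c ∈ a, p c = true) (hy : p y = false) :
    (a ++ y :: x).takeWhile p = a ∧ (a ++ y :: x).dropWhile p = y :: x := by
  induction a with
  | nil => simp [List.takeWhile_cons, List.dropWhile_cons, hy]
  | cons c t ih =>
    simp at ha
    have := ih ha.2
    simp [List.takeWhile_cons, List.dropWhile_cons, ha.1, this.1, this.2]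

theorem pvFilter_dropWhile (q : Char → Bool) (w : Char → Bool)
    (hq : ∀ c, w c = true → q c = false) (l : List Char) :
    (l.dropWhile w).filter q = l.filter q := by
  induction l with
  | nil => rfl
  | cons c t ih =>
    by_cases hw : w c = true
    · rw [List.dropWhile_cons_of_pos hw, ih, List.filter_cons_of_neg (by simp [hq c hw])]
    · rw [List.dropWhile_cons_of_neg hw]

-- filtering through strip: strip removes only whitespace, which fails q
theorem pvFilter_strip (q : Char → Bool) (hq : ∀ c, PySem.Chars.isspace c = true → q c = false)
    (l : List Char) : (PySem.Chars.strip l).filter q = l.filter q := by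
  unfold PySem.Chars.strip PySem.Chars.rstrip PySem.Chars.lstrip
  rw [List.filter_reverse, pvFilter_dropWhile q _ hq, List.filter_reverse, List.reverse_reverse,
    pvFilter_dropWhile q _ hq]

theorem pvQ_space (c : Char) (h : PySem.Chars.isspace c = true) : pvQ c = false := by
  have hd : c ≠ '.' := by rintro rfl; exact absurd h (by decide)
  have hcm : c ≠ ',' := by rintro rfl; exact absurd h (by decide)
  have hdig : PySem.Chars.isdigit c = false := by
    simp only [PySem.Chars.isspace, Char.toNat, decide_eq_true_eq, Bool.or_eq_true,
      Bool.and_eq_true] at h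
    simp only [PySem.Chars.isdigit, Bool.and_eq_false_iff, decide_eq_false_iff_not, not_le,
      Char.lt_def, Char.le_def]
    rcases Nat.lt_or_ge c.val.toNat 48 with h48 | h48
    · left
      intro hle
      have h0 : ('0':Char).val.toNat = 48 := rfl
      have := UInt32.le_iff_toNat_le.mp hle
      omega
    · right
      intro hle
      have h9 : ('9':Char).val.toNat = 57 := rfl
      have := UInt32.le_iff_toNat_le.mp hle
      omega
  simp [pvQ, pvF, pvP, hd, hcm, hdig]

theorem pvDropWhile_head {p : Char → Bool} {l x : List Char} {c : Char}
    (h : l.dropWhile p = c :: x) : p c = false := by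
  induction l with
  | nil => simp at h
  | cons d t ih =>
    rw [List.dropWhile_cons] at h
    split at h
    · exact ih h
    · cases h; simp_all

-- the final "limit to 2 decimals" part of A, let-free
def pvTail2 (s5 : List Char) : List Char :=
  if PySem.Chars.isIn [','] s5 then
    match PySem.Chars.splitOnMax s5 [','] 1 with
    | inteira :: dec :: _ => inteira ++ [','] ++ PySem.List.slice dec none (some 2)
    | _ => s5
  else s5

-- the "collapse to one comma" part of A, let-free
def pvTail (l : List Char) : List Char :=
  pvTail2 (if 1 < PySem.Chars.count l [','] then
      (PySem.Chars.splitOn l [',']).headD [] ++ [','] ++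
        PySem.Chars.replace (PySem.Chars.join [] (PySem.Chars.splitOn l [',']).tail) [','] []
    else l)

theorem pvAcore_tail (cs : List Char) :
    pvAcore cs = pvTail (((PySem.Chars.replace
      (PySem.Chars.replace (PySem.Chars.replace (PySem.Chars.strip cs) ['R','$'] []) [' '] [])
      ['.'] [','])).filter pvP) := by
  simp only [pvAcore, pvTail, pvTail2]

theorem pvCount_char (l : List Char) : PySem.Chars.count l [','] = l.count ',' := by
  unfold PySem.Chars.count
  rw [if_neg (by simp), pvCount_go _ _ _ _ (le_refl _)]
  simp

theorem pvReplace_del (v : Char) (m : List Char) :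
    PySem.Chars.replace m [v] [] = m.filter (· != v) := by
  unfold PySem.Chars.replace
  rw [if_neg (by simp), pvGo_del _ _ _ _ (le_refl _)]
  simp

theorem pvReplace_map (o nc : Char) (m : List Char) :
    PySem.Chars.replace m [o] [nc] = m.map (fun c => if c = o then nc else c) := by
  unfold PySem.Chars.replace
  rw [if_neg (by simp), pvGo_map _ _ _ _ _ (le_refl _)]
  simp

theorem pvReplaceRS_filter (m : List Char) :
    (PySem.Chars.replace m ['R','$'] []).filter pvQ = m.filter pvQ := by
  unfold PySem.Chars.replace
  rw [if_neg (by simp)]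
  rw [pvGo_del_filter pvQ ['R','$'] (by simp) (by intro c hc; simp at hc; rcases hc with rfl | rfl <;> rfl) _ _ _ (le_refl _)]
  simp

theorem pvFilterMap (m : List Char) :
    (m.map pvF).filter pvP = (m.filter pvQ).map pvF := by
  rw [List.filter_map]
  rfl

theorem pvF_eq : (fun c => if c = '.' then ',' else c) = pvF := rfl

theorem pvSplitMax_char (a x : List Char) (ha : ∀ c ∈ a, (c != ',') = true) :
    PySem.Chars.splitOnMax (a ++ ',' :: x) [','] 1 = [a, x] := by
  unfold PySem.Chars.splitOnMax
  rw [if_neg (by omega)]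
  have h1 : ((1:Int).toNat) = 1 := rfl
  rw [h1, pvSplitMax_go1 _ _ _ _ _ (Nat.le_succ _)]
  rw [if_pos (by simp : ',' ∈ a ++ ',' :: x)]
  have := pvTW (fun y => y != ',') a ',' x ha (by simp)
  simp only [List.reverse_nil, List.nil_append]
  rw [this.1, this.2]
  simp

theorem pvTail2_split (a x : List Char) (ha : ∀ c ∈ a, (c != ',') = true) :
    pvTail2 (a ++ ',' :: x) = a ++ [','] ++ x.take 2 := by
  rw [pvTail2, if_pos ((pvIsIn_singleton _ _).mpr (by simp)), pvSplitMax_char _ _ ha]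
  show a ++ [','] ++ PySem.List.slice x none (some 2) = _
  rw [PySem.List.slice_to _ (by omega)]
  rfl

-- A's post-processing equals the canonical result on any character list
theorem pvPost (l : List Char) : pvTail l = pvR l := by
  by_cases hm : ',' ∈ l
  case neg =>
    have hc0 : l.count ',' = 0 := List.count_eq_zero.mpr hm
    have hiin : PySem.Chars.isIn [','] l = false :=
      Bool.eq_false_iff.mpr (fun hh => hm ((pvIsIn_singleton _ _).mp hh))
    rw [pvTail, if_neg (by rw [pvCount_char]; omega), pvTail2, if_neg (by simp [hiin]), pvR,
      if_neg hm]
  case pos =>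
    -- decompose l = a ++ ',' :: b
    set a := l.takeWhile (· != ',') with ha
    set b := (l.dropWhile (· != ',')).tail with hb
    have hne : l.dropWhile (· != ',') ≠ [] := by
      intro hnil
      have := List.dropWhile_eq_nil_iff.mp hnil _ hm
      simp at this
    have hdw : l.dropWhile (· != ',') = ',' :: b := by
      cases hcase : l.dropWhile (· != ',') with
      | nil => exact absurd hcase hne
      | cons x xs =>
        have hx : (x != ',') = false := pvDropWhile_head (p := fun y => y != ',') hcase
        have hx' : x = ',' := by simpa using hx
        rw [hb, hcase, hx']
        simp
    have hl_eq : l = a ++ ',' :: b := by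
      rw [ha, ← hdw, List.takeWhile_append_dropWhile]
    have hana : ∀ c ∈ a, (c != ',') = true :=
      fun c hc => List.mem_takeWhile_imp (p := fun y => y != ',') (ha ▸ hc)
    have hcount : l.count ',' = 1 + b.count ',' := by
      rw [hl_eq, List.count_append, List.count_cons]
      have : a.count ',' = 0 := List.count_eq_zero.mpr (fun hmem => by simpa using hana _ hmem)
      simp [this]
      omega
    by_cases hgt : 1 < l.count ','
    · -- more than one comma: collapse, then truncate
      have hsplit : PySem.Chars.splitOn l [','] = a :: pvPieces ',' [] b := by
        unfold PySem.Chars.splitOn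
        rw [pvSplitOn_go _ _ _ _ _ (Nat.le_succ _)]
        simp only [List.reverse_nil, List.nil_append]
        rw [pvPieces_mem _ _ _ hm]
        rw [← ha, ← hb]
        simp
      have hjoin : PySem.Chars.join [] (pvPieces ',' [] b) = b.filter (· != ',') := by
        show List.intercalate [] (pvPieces ',' [] b) = b.filter (· != ',')
        rw [pvIntercalate_nil, pvPieces_flatten]
        simp
      rw [pvTail, if_pos (by rw [pvCount_char]; omega), hsplit]
      simp only [List.headD_cons, List.tail_cons]
      rw [hjoin, pvReplace_del]
      have hff : (b.filter (· != ',')).filter (· != ',') = b.filter (· != ',') := by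
        simp [List.filter_filter]
      rw [hff]
      have hform : a ++ [','] ++ b.filter (· != ',') = a ++ ',' :: b.filter (· != ',') := by simp
      rw [hform, pvTail2_split _ _ hana]
      rw [pvR, if_pos hm, ← ha, ← hb]
      simp
    · -- exactly one comma
      have hb0 : b.count ',' = 0 := by omega
      have hbf : b.filter (· != ',') = b := by
        rw [List.filter_eq_self]
        intro c hc
        have : c ≠ ',' := fun hh => by
          subst hh
          exact absurd (List.count_pos_iff.mpr hc) (by omega)
        simp [this]
      rw [pvTail, if_neg (by rw [pvCount_char]; omega)]
      conv_lhs => rw [hl_eq]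
      rw [pvTail2_split _ _ hana]
      rw [pvR, if_pos hm, ← ha, ← hb, hbf]
      simp

-- A computes the canonical result of the filtered, '.'-mapped character list
theorem pvA_canon (cs : List Char) : pvAcore cs = pvR ((cs.map pvF).filter pvP) := by
  rw [pvAcore_tail]
  have hs3 : ((PySem.Chars.replace
      (PySem.Chars.replace (PySem.Chars.replace (PySem.Chars.strip cs) ['R','$'] []) [' '] [])
      ['.'] [','])).filter pvP = (cs.map pvF).filter pvP := by
    rw [pvReplace_map, pvF_eq, pvFilterMap, pvFilterMap]
    congr 1
    rw [pvReplace_del, List.filter_comm, pvReplaceRS_filter,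
      pvFilter_strip pvQ pvQ_space]
    apply List.filter_eq_self.mpr
    intro c hc
    have hqc : pvQ c = true := (List.mem_filter.mp hc).2
    have hcs : c ≠ ' ' := fun hh => by subst hh; simp [pvQ, pvF, pvP, PySem.Chars.isdigit] at hqc
    simp [hcs]
  rw [hs3]
  exact pvPost _

-- B's step ignores characters failing pvQ and acts through pvF on the rest
theorem pvB_reduce (cs : List Char) (st : Bool × Nat × List Char) :
    cs.foldl pvBstep st = ((cs.map pvF).filter pvP).foldl pvBstep st := by
  induction cs generalizing st with
  | nil => rfl
  | cons c t ih =>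
    by_cases hq : pvP (pvF c) = true
    · have hstep : pvBstep st c = pvBstep st (pvF c) := by
        by_cases hd : c = '.'
        · subst hd
          simp [pvBstep, pvF, PySem.Chars.isdigit]
        · simp [pvF, hd]
      simp only [List.map_cons, List.filter_cons, hq, if_pos, List.foldl_cons, hstep]
      exact ih _
    · have hstep : pvBstep st c = st := by
        have hnd : PySem.Chars.isdigit c = false := by
          by_cases hd : c = '.'
          · subst hd; decide
          · rcases Bool.eq_false_or_eq_true (PySem.Chars.isdigit c) with hh | hh
            · exfalso; apply hq; simp [pvF, pvP, hd, hh]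
            · exact hh
        have hd : c ≠ '.' := fun hh => by subst hh; simp [pvF, pvP] at hq
        have hcm : c ≠ ',' := fun hh => by subst hh; simp [pvF, pvP] at hq
        simp [pvBstep, hnd, hd, hcm]
      simp only [List.map_cons, List.filter_cons, List.foldl_cons, hstep]
      simp only [hq, Bool.false_eq_true, if_false]
      exact ih _
  -- note: pvQ c = pvP (pvF c) definitionally

-- after the comma B appends the next (2-k) non-comma characters
theorem pvB_after (l : List Char) (hl : ∀ c ∈ l, pvP c = true) (k : Nat) (out : List Char) :
    (l.foldl pvBstep (true, k, out)).2.2 = out ++ (l.filter (· != ',')).take (2 - k) := by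
  induction l generalizing k out with
  | nil => simp
  | cons c t ih =>
    simp at hl
    by_cases hcm : c = ','
    · subst hcm
      have : pvBstep (true, k, out) ',' = (true, k, out) := by
        simp [pvBstep, PySem.Chars.isdigit]
      simp only [List.foldl_cons, this, List.filter_cons]
      rw [ih hl.2]
      simp
    · have hdig : PySem.Chars.isdigit c = true := by
        have h := hl.1; simp [pvP, hcm] at h; exact h
      have hbne : (c != ',') = true := by simp [hcm]
      by_cases hk : k < 2
      · have : pvBstep (true, k, out) c = (true, k+1, out ++ [c]) := by
          simp [pvBstep, hdig, hk]
        simp only [List.foldl_cons, this, List.filter_cons, hbne, if_pos]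
        rw [ih hl.2]
        obtain ⟨m, hmeq⟩ : ∃ m, 2 - k = m + 1 := ⟨2 - k - 1, by omega⟩
        rw [hmeq]
        have : 2 - (k+1) = m := by omega
        rw [this, List.take_succ_cons]
        simp
      · have : pvBstep (true, k, out) c = (true, k, out) := by
          simp [pvBstep, hdig, hk]
        simp only [List.foldl_cons, this, List.filter_cons, hbne, if_pos]
        rw [ih hl.2]
        have : 2 - k = 0 := by omega
        simp [this]

-- before the comma B builds the canonical result
theorem pvB_canon (l : List Char) (hl : ∀ c ∈ l, pvP c = true) (out : List Char) :
    (l.foldl pvBstep (false, 0, out)).2.2 = out ++ pvR l := by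
  induction l generalizing out with
  | nil => simp [pvR]
  | cons c t ih =>
    simp at hl
    by_cases hcm : c = ','
    · subst hcm
      have : pvBstep (false, 0, out) ',' = (true, 0, out ++ [',']) := by
        simp [pvBstep, PySem.Chars.isdigit]
      simp only [List.foldl_cons, this]
      rw [pvB_after _ hl.2 0 _]
      simp [pvR]
    · have hdig : PySem.Chars.isdigit c = true := by
        have h := hl.1; simp [pvP, hcm] at h; exact h
      have : pvBstep (false, 0, out) c = (false, 0, out ++ [c]) := by
        simp [pvBstep, hdig]
      simp only [List.foldl_cons, this]
      rw [ih hl.2, pvR_cons _ _ hcm]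
      simp

-- ===== VERDICT (by name: the statement is the Claim_ definition above) =====
theorem texto_para_digitacao_py_spec : Claim_equal_texto_para_digitacao_py := by
  intro s _
  unfold Spec_texto_para_digitacao_py texto_para_digitacao_py texto_para_digitacao_py_alt
  rw [pvA_canon, pvB_reduce]
  rw [pvB_canon _ (fun c hc => (List.mem_filter.mp hc).2) []]
  simp
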